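-- pv_equiv track=rewrite | github.com/felix-antonio-sl/hdos | scripts/build_hodom_canonical.py | build_coverage_gaps
-- ===== SOURCE A (Python) =====
-- def build_coverage_gaps(
--     stays: list[dict[str, str]],
-- ) -> list[dict[str, str]]:
--     """Detect months where ingresos fall below 70 % of the 6-month moving avg.
--
--     For each month present in *stays* (derived from ``fecha_ingreso[:7]``),
--     the function computes how many stays started that month (observed) and
--     compares it to the average of the preceding 6 months (expected).  If
--     ``observed / expected < 0.70`` the month is flagged.
--
--     Months with fewer than 6 preceding months of data are still evaluated
--     using whatever history is available.  If there is no preceding data the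
--     month is not flagged.
--
--     Args:
--         stays: Consolidated stays.
--
--     Returns:
--         One dict per month with fields from :data:`COVERAGE_GAP_FIELDS`.
--     """
--     # Count stays per month
--     month_counts: dict[str, int] = {}
--     for stay in stays:
--         fi = stay.get("fecha_ingreso", "")
--         if len(fi) >= 7:
--             month = fi[:7]
--             month_counts[month] = month_counts.get(month, 0) + 1
--
--     if not month_counts:
--         return []
--
--     sorted_months = sorted(month_counts.keys())
--
--     rows: list[dict[str, str]] = []
--     for i, month in enumerate(sorted_months):
--         observed = month_counts[month]
--
--         # Preceding months (up to 6)
--         preceding = sorted_months[max(0, i - 6):i]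
--         if not preceding:
--             # No history — cannot compute moving average; report without flag
--             rows.append({
--                 "month": month,
--                 "metric": "ingresos",
--                 "observed": str(observed),
--                 "expected": "",
--                 "ratio": "",
--                 "gap_flag": "False",
--             })
--             continue
--
--         expected = sum(month_counts[m] for m in preceding) / len(preceding)
--         ratio = observed / expected if expected else 0.0
--         gap_flag = "True" if ratio < 0.70 else "False"
--
--         rows.append({
--             "month": month,
--             "metric": "ingresos",
--             "observed": str(observed),
--             "expected": f"{expected:.2f}",
--             "ratio": f"{ratio:.2f}",
--             "gap_flag": gap_flag,
--         })
--
--     return rows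
-- ===== SOURCE B (Python) =====
-- def build_coverage_gaps(
--     stays: list[dict[str, str]],
-- ) -> list[dict[str, str]]:
--     """Same result as A, but without the month dict and without per-month
--     re-summing: sort the raw month stamps, group equal runs into
--     (month, count) pairs, then walk the groups once keeping a sliding
--     window (the up-to-6 preceding counts) and its running sum."""
--     months_all = sorted(
--         stay.get("fecha_ingreso", "")[:7]
--         for stay in stays
--         if len(stay.get("fecha_ingreso", "")) >= 7
--     )
--
--     groups: list[tuple[str, int]] = []
--     for m in months_all:
--         if groups and groups[-1][0] == m:
--             groups[-1] = (m, groups[-1][1] + 1)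
--         else:
--             groups.append((m, 1))
--
--     rows: list[dict[str, str]] = []
--     window: list[int] = []
--     wsum = 0
--     for month, observed in groups:
--         if not window:
--             rows.append({
--                 "month": month,
--                 "metric": "ingresos",
--                 "observed": str(observed),
--                 "expected": "",
--                 "ratio": "",
--                 "gap_flag": "False",
--             })
--         else:
--             expected = wsum / len(window)
--             ratio = observed / expected if expected else 0.0
--             rows.append({
--                 "month": month,
--                 "metric": "ingresos",
--                 "observed": str(observed),
--                 "expected": f"{expected:.2f}",
--                 "ratio": f"{ratio:.2f}",
--                 "gap_flag": "True" if ratio < 0.70 else "False",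
--             })
--         window = window + [observed]
--         wsum += observed
--         if len(window) > 6:
--             wsum -= window[0]
--             window = window[1:]
--     return rows
-- ===== Notes on version B (the rewrite author's own statement) =====
-- stated objective: alternative
-- what changed: B drops A's month dict entirely: it sorts the raw month stamps, groups equal runs into (month,count) pairs in one pass, then walks the groups once keeping a sliding window of the up-to-6 preceding counts and its running sum, so A's per-month slice-and-resum with dict lookups disappears.
import Mathlib
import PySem

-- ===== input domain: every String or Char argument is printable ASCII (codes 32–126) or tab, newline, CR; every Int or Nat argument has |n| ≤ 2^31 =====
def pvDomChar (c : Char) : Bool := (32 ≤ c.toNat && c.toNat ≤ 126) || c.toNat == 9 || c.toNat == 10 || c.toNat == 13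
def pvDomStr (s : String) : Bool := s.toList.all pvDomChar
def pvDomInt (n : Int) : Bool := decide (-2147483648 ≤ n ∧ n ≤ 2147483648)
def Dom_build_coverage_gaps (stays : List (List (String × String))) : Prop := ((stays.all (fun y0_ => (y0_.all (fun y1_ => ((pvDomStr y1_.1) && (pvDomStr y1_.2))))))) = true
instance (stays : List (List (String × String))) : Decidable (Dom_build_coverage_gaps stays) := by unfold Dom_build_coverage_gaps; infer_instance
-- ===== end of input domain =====

-- B drops A's month dict: it sorts the raw month stamps, groups equal runs into (month, count)
-- pairs, then walks the groups once with a sliding window of the up-to-6 preceding counts and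
-- its running sum (alternative decomposition, same observable result).

-- ---- shared IEEE-754 double emulation (exact values as rationals; used identically by both ports) ----
-- Python floats are binary64.  pvFlPos p q is the correctly rounded (round-half-even, 53-bit) value of
-- the positive rational p/q; exact for every value in the normal finite range (all values both programs
-- ever produce).  pvFmt2 is f"{x:.2f}" for a nonnegative such value (correct rounding, ties to even).
def pvBitlen (n : Nat) : Nat := if n = 0 then 0 else Nat.log2 n + 1

def pvShiftDiv (p q : Nat) (t : Int) : Nat × Nat × Nat :=
  if 0 ≤ t then let P := p <<< t.toNat; (P / q, P % q, q)
  else let Q := q <<< (-t).toNat; (p / Q, p % Q, Q)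

def pvQ2 (n : Nat) (t : Int) : ℚ :=
  if 0 ≤ t then (n : ℚ) / ((2 : ℚ) ^ t.toNat) else (n : ℚ) * (2 : ℚ) ^ (-t).toNat

def pvFlPos (p q : Nat) : ℚ :=
  let t0 : Int := 53 - ((pvBitlen p : Int) - (pvBitlen q : Int))
  let n0 := (pvShiftDiv p q t0).1
  let t := if 2 ^ 53 ≤ n0 then t0 - 1 else t0
  let x := pvShiftDiv p q t
  let n := x.1; let r := x.2.1; let Q := x.2.2
  let n' := if Q < 2 * r then n + 1 else if 2 * r < Q then n
            else if n % 2 = 0 then n else n + 1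
  pvQ2 n' t

def pvFl (x : ℚ) : ℚ := if x ≤ 0 then 0 else pvFlPos x.num.toNat x.den

-- Python's  int / int  (correctly rounded true division) and  int / float
def pvDivII (a b : Int) : ℚ := pvFl ((a : ℚ) / (b : ℚ))
def pvDivIF (a : Int) (x : ℚ) : ℚ := pvFl ((pvFl (a : ℚ)) / x)

def pvFmt2 (x : ℚ) : String :=
  let a := (100 * x).num.toNat
  let b := (100 * x).den
  let n := a / b; let r := a % b
  let N := if b < 2 * r then n + 1 else if 2 * r < b then n
           else if n % 2 = 0 then n else n + 1
  PySem.Int.toStr (N / 100) ++ "." ++ PySem.Str.zfill (PySem.Int.toStr (N % 100)) 2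

-- the double literal 0.70
def pvC07 : ℚ := pvFlPos 7 10

-- ===== PORT A =====
-- A's counting loop over stays (dict month -> count)
def pvMonthCounts (stays : List (List (String × String))) : PySem.Dict String Int :=
  stays.foldl (fun d stay =>
    let fi := PySem.Dict.getD (PySem.Dict.mk stay) "fecha_ingreso" ""
    if 7 ≤ PySem.Str.len fi then
      let month := PySem.Str.slice fi none (some 7)
      d.insert month (d.getD month 0 + 1)
    else d) (PySem.Dict.mk [])

def build_coverage_gaps (stays : List (List (String × String))) : List (List (String × String)) :=
  let mc := pvMonthCounts stays
  if mc.items.isEmpty then [] else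
  let sorted_months := PySem.List.sorted mc.keys (fun m => m)
  (PySem.List.enumerate sorted_months).foldl (fun rows p =>
    let i := p.1; let month := p.2
    let observed := mc.getD month 0
    let preceding := PySem.List.slice sorted_months (some (max 0 (i - 6))) (some i)
    if preceding.isEmpty then
      rows ++ [[("month", month), ("metric", "ingresos"), ("observed", PySem.Int.toStr observed),
                ("expected", ""), ("ratio", ""), ("gap_flag", "False")]]
    else
      let expected := pvDivII ((preceding.map (fun m => mc.getD m 0)).sum) (preceding.length : Int)
      let ratio := if expected ≠ 0 then pvDivIF observed expected else 0
      let gap_flag := if ratio < pvC07 then "True" else "False"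
      rows ++ [[("month", month), ("metric", "ingresos"), ("observed", PySem.Int.toStr observed),
                ("expected", pvFmt2 expected), ("ratio", pvFmt2 ratio), ("gap_flag", gap_flag)]]) []

-- ===== PORT B =====
-- B's extraction of the raw month stamps (the generator fed to sorted)
def pvMonthsOf (stays : List (List (String × String))) : List String :=
  stays.filterMap (fun stay =>
    let fi := PySem.Dict.getD (PySem.Dict.mk stay) "fecha_ingreso" ""
    if 7 ≤ PySem.Str.len fi then some (PySem.Str.slice fi none (some 7)) else none)

-- B's grouping loop body (run-length encode adjacent equal months)
def pvGroupStep (gs : List (String × Int)) (m : String) : List (String × Int) :=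
  match gs.getLast? with
  | some g => if g.1 = m then gs.dropLast ++ [(m, g.2 + 1)] else gs ++ [(m, 1)]
  | none => gs ++ [(m, 1)]

-- B's row loop: walk the groups keeping the window of preceding counts and its running sum
def pvWalk : List Int → Int → List (String × Int) → List (List (String × String))
  | _, _, [] => []
  | window, wsum, g :: rest =>
    let month := g.1
    let observed := g.2
    let row :=
      if window.isEmpty then
        [("month", month), ("metric", "ingresos"), ("observed", PySem.Int.toStr observed),
         ("expected", ""), ("ratio", ""), ("gap_flag", "False")]
      else
        let expected := pvDivII wsum (window.length : Int)
        let ratio := if expected ≠ 0 then pvDivIF observed expected else 0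
        let gap_flag := if ratio < pvC07 then "True" else "False"
        [("month", month), ("metric", "ingresos"), ("observed", PySem.Int.toStr observed),
         ("expected", pvFmt2 expected), ("ratio", pvFmt2 ratio), ("gap_flag", gap_flag)]
    let window' := window ++ [observed]
    let wsum' := wsum + observed
    if 6 < window'.length then
      row :: pvWalk (PySem.List.slice window' (some 1) none)
                    (wsum' - PySem.List.pyGetD window' 0 0) rest
    else
      row :: pvWalk window' wsum' rest

def build_coverage_gaps_alt (stays : List (List (String × String))) : List (List (String × String)) :=
  let months_all := PySem.List.sorted (pvMonthsOf stays) (fun m => m)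
  let groups := months_all.foldl pvGroupStep []
  pvWalk [] 0 groups

-- ===== PRECONDITION & SPEC =====
def Spec_build_coverage_gaps (stays : List (List (String × String))) (out : List (List (String × String))) : Prop := out = build_coverage_gaps_alt stays
instance (stays : List (List (String × String))) (out : List (List (String × String))) : Decidable (Spec_build_coverage_gaps stays out) := by unfold Spec_build_coverage_gaps; infer_instance

-- ===== CLAIM (what is proved, stated in full; the proofs are below) =====
def Claim_equal_build_coverage_gaps : Prop := ∀ (stays : List (List (String × String))), Dom_build_coverage_gaps stays → Spec_build_coverage_gaps stays (build_coverage_gaps stays)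

-- ===== LEMMAS AND PROOFS =====

-- A's counting loop is the counter of B's extracted month list
lemma pvMC_gen (stays : List (List (String × String))) (d : PySem.Dict String Int) :
    stays.foldl (fun d stay =>
      let fi := PySem.Dict.getD (PySem.Dict.mk stay) "fecha_ingreso" ""
      if 7 ≤ PySem.Str.len fi then
        let month := PySem.Str.slice fi none (some 7)
        d.insert month (d.getD month 0 + 1)
      else d) d
      = (pvMonthsOf stays).foldl (fun d m => d.insert m (d.getD m 0 + 1)) d := by
  induction stays generalizing d with
  | nil => rfl
  | cons s t ih =>
      simp only [pvMonthsOf, List.filterMap_cons, List.foldl_cons] at ih ⊢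
      split
      · simp only [List.foldl_cons]; exact ih _
      · exact ih _

lemma pvMC_eq_counter (stays : List (List (String × String))) :
    pvMonthCounts stays = PySem.Dict.counter (pvMonthsOf stays) := by
  rw [← PySem.Dict.foldl_insert_getD_add_one_eq_counter]
  exact pvMC_gen stays (PySem.Dict.mk [])

-- counts in a flatMap of replicates over a Nodup spine
lemma pvCount_flatMap_replicate (K : List String) (g : String → Nat) (hK : K.Nodup) (x : String) :
    (K.flatMap fun m => List.replicate (g m) m).count x = if x ∈ K then g x else 0 := by
  induction K with
  | nil => simp
  | cons m K ih =>
      rcases List.nodup_cons.mp hK with ⟨hm, hK'⟩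
      simp only [List.flatMap_cons, List.count_append, ih hK', List.count_replicate,
        List.mem_cons]
      by_cases hx : x = m
      · subst hx; simp [hm]
      · have hx' : ¬ m = x := fun h => hx h.symm
        simp [hx, hx']

-- a flatMap of replicates over a strictly increasing spine is sorted (≤)
lemma pvPairwise_le_flatMap_replicate (K : List String) (g : String → Nat)
    (hK : K.Pairwise (· < ·)) :
    (K.flatMap fun m => List.replicate (g m) m).Pairwise (· ≤ ·) := by
  induction K with
  | nil => simp
  | cons m K ih =>
      rcases List.pairwise_cons.mp hK with ⟨hm, hK'⟩
      simp only [List.flatMap_cons]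
      refine List.pairwise_append.mpr ⟨?_, ih hK', ?_⟩
      · exact List.pairwise_replicate.mpr (Or.inr le_rfl)
      · intro a ha b hb
        obtain rfl := List.eq_of_mem_replicate ha
        obtain ⟨m', hm', hb'⟩ := List.mem_flatMap.mp hb
        obtain rfl := List.eq_of_mem_replicate hb'
        exact le_of_lt (hm _ hm')

-- grouping: the accumulator's settled prefix is inert
lemma pvGroup_shift (l : List String) (acc : List (String × Int)) (m : String) (c : Int) :
    l.foldl pvGroupStep (acc ++ [(m, c)]) = acc ++ l.foldl pvGroupStep [(m, c)] := by
  induction l generalizing acc m c with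
  | nil => simp
  | cons x t ih =>
      have hstep : ∀ (a : List (String × Int)), pvGroupStep (a ++ [(m, c)]) x
          = if m = x then a ++ [(x, c + 1)] else (a ++ [(m, c)]) ++ [(x, 1)] := by
        intro a; simp [pvGroupStep]
      have hstep1 : pvGroupStep [(m, c)] x
          = if m = x then [(x, c + 1)] else [(m, c)] ++ [(x, 1)] := by
        have := hstep []; simpa using this
      simp only [List.foldl_cons, hstep acc, hstep1]
      by_cases hx : m = x
      · simp only [hx]
        simpa using ih acc x (c + 1)
      · simp only [hx, if_false]
        rw [ih (acc ++ [(m, c)]) x 1, ih [(m, c)] x 1]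
        simp

-- grouping absorbs a run of equal months into the last pair's count
lemma pvGroup_absorb (k : Nat) (m : String) (c : Int) (t : List String) :
    (List.replicate k m ++ t).foldl pvGroupStep [(m, c)]
      = t.foldl pvGroupStep [(m, c + k)] := by
  induction k generalizing c with
  | zero => simp
  | succ k ih =>
      simp only [List.replicate_succ, List.cons_append, List.foldl_cons]
      have hstep : pvGroupStep [(m, c)] m = [(m, c + 1)] := by simp [pvGroupStep]
      rw [hstep, ih (c + 1),
        show c + 1 + (k : Int) = c + (((k + 1 : Nat)) : Int) by push_cast; ring]

-- grouping a sorted run-length-decomposed list yields the (month, count) pairs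
lemma pvGroup_flat (K : List String) (g : String → Nat) (hg : ∀ m ∈ K, 0 < g m)
    (hc : K.IsChain (· ≠ ·)) :
    (K.flatMap fun m => List.replicate (g m) m).foldl pvGroupStep []
      = K.map (fun m => (m, (g m : Int))) := by
  induction K with
  | nil => rfl
  | cons m K ih =>
      obtain ⟨n, hn⟩ := Nat.exists_eq_succ_of_ne_zero (Nat.pos_iff_ne_zero.mp (hg m List.mem_cons_self))
      simp only [List.flatMap_cons, hn, List.replicate_succ, List.cons_append, List.foldl_cons]
      have h0 : pvGroupStep [] m = [(m, 1)] := by simp [pvGroupStep]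
      rw [h0, pvGroup_absorb n m 1]
      have hrest : (K.flatMap fun m => List.replicate (g m) m).foldl pvGroupStep [(m, 1 + (n : Int))]
          = [(m, 1 + (n : Int))] ++ (K.flatMap fun m => List.replicate (g m) m).foldl pvGroupStep [] := by
        cases K with
        | nil => simp
        | cons m' K' =>
            obtain ⟨n', hn'⟩ := Nat.exists_eq_succ_of_ne_zero
              (Nat.pos_iff_ne_zero.mp (hg m' (by simp)))
            have hne : m ≠ m' := (List.isChain_cons_cons.mp hc).1
            simp only [List.flatMap_cons, hn', List.replicate_succ, List.cons_append,
              List.foldl_cons]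
            have hstep : pvGroupStep [(m, 1 + (n : Int))] m' = [(m, 1 + (n : Int))] ++ [(m', 1)] := by
              simp [pvGroupStep, hne]
            have h0' : pvGroupStep [] m' = [(m', 1)] := by simp [pvGroupStep]
            rw [hstep, pvGroup_shift, h0']
            simp
      rw [hrest, ih (fun m hm => hg m (by simp [hm])) hc.of_cons]
      have : (1 : Int) + (n : Int) = ((g m : Nat) : Int) := by rw [hn]; push_cast; ring
      simp [this]

-- proof-only helper: A's loop body as a row function
def pvRowA (mc : PySem.Dict String Int) (sorted_months : List String) (p : Int × String) :
    List (String × String) :=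
  let i := p.1; let month := p.2
  let observed := mc.getD month 0
  let preceding := PySem.List.slice sorted_months (some (max 0 (i - 6))) (some i)
  if preceding.isEmpty then
    [("month", month), ("metric", "ingresos"), ("observed", PySem.Int.toStr observed),
     ("expected", ""), ("ratio", ""), ("gap_flag", "False")]
  else
    let expected := pvDivII ((preceding.map (fun m => mc.getD m 0)).sum) (preceding.length : Int)
    let ratio := if expected ≠ 0 then pvDivIF observed expected else 0
    let gap_flag := if ratio < pvC07 then "True" else "False"
    [("month", month), ("metric", "ingresos"), ("observed", PySem.Int.toStr observed),
     ("expected", pvFmt2 expected), ("ratio", pvFmt2 ratio), ("gap_flag", gap_flag)]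

-- an append-one-row loop is a map
lemma pvFold_map {α β : Type} (f : β → List α) (l : List β)
    (F : List (List α) → β → List (List α)) (hF : ∀ acc x, F acc x = acc ++ [f x]) :
    l.foldl F [] = l.map f := by
  rw [PySem.List.foldl_congr_mem l F (fun acc x => acc ++ [f x]) [] (fun acc x _ => hF acc x)]
  simpa using PySem.List.foldl_append_singleton_eq_map f l []

-- B's row for index i equals A's row function at (i, K[i])
lemma pvRow_eq (mc : PySem.Dict String Int) (K : List String) (i : Nat) (hlt : i < K.length) :
    (if (((K.map (fun m => mc.getD m 0)).drop (i - 6)).take (i - (i - 6))).isEmpty = true then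
      [("month", K[i]), ("metric", "ingresos"), ("observed", PySem.Int.toStr (mc.getD K[i] 0)),
       ("expected", ""), ("ratio", ""), ("gap_flag", "False")]
    else
      [("month", K[i]), ("metric", "ingresos"), ("observed", PySem.Int.toStr (mc.getD K[i] 0)),
       ("expected", pvFmt2 (pvDivII ((((K.map (fun m => mc.getD m 0)).drop (i - 6)).take (i - (i - 6))).sum)
          (((((K.map (fun m => mc.getD m 0)).drop (i - 6)).take (i - (i - 6))).length : Int)))),
       ("ratio", pvFmt2 (if pvDivII ((((K.map (fun m => mc.getD m 0)).drop (i - 6)).take (i - (i - 6))).sum)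
            (((((K.map (fun m => mc.getD m 0)).drop (i - 6)).take (i - (i - 6))).length : Int)) ≠ 0 then
          pvDivIF (mc.getD K[i] 0) (pvDivII ((((K.map (fun m => mc.getD m 0)).drop (i - 6)).take (i - (i - 6))).sum)
            (((((K.map (fun m => mc.getD m 0)).drop (i - 6)).take (i - (i - 6))).length : Int))) else 0)),
       ("gap_flag", if (if pvDivII ((((K.map (fun m => mc.getD m 0)).drop (i - 6)).take (i - (i - 6))).sum)
            (((((K.map (fun m => mc.getD m 0)).drop (i - 6)).take (i - (i - 6))).length : Int)) ≠ 0 then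
          pvDivIF (mc.getD K[i] 0) (pvDivII ((((K.map (fun m => mc.getD m 0)).drop (i - 6)).take (i - (i - 6))).sum)
            (((((K.map (fun m => mc.getD m 0)).drop (i - 6)).take (i - (i - 6))).length : Int))) else 0) < pvC07
          then "True" else "False")])
    = pvRowA mc K ((i : Int), K[i]) := by
  by_cases hi0 : i = 0
  · subst hi0
    simp [pvRowA, PySem.List.slice_zero_start, PySem.List.slice_to]
  · have hmax : max 0 ((i : Int) - 6) = ((i - 6 : Nat) : Int) := by omega
    have hpre : PySem.List.slice K (some (max 0 ((i : Int) - 6))) (some (i : Int))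
        = (K.drop (i - 6)).take (i - (i - 6)) := by
      rw [hmax, PySem.List.slice_natCast]
    have hmapW : ((K.map (fun m => mc.getD m 0)).drop (i - 6)).take (i - (i - 6))
        = ((K.drop (i - 6)).take (i - (i - 6))).map (fun m => mc.getD m 0) := by
      simp [List.map_take, List.map_drop]
    have hne : ((K.drop (i - 6)).take (i - (i - 6))).isEmpty = false := by
      simp only [List.isEmpty_eq_false_iff, ne_eq, ← List.length_pos_iff, List.length_take,
        List.length_drop]
      omega
    simp only [pvRowA, hpre, hmapW, hne, List.isEmpty_map, Bool.false_eq_true, if_false,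
      List.length_map]

-- the sliding-window walk over the groups produces exactly A's rows, suffix by suffix
lemma pvWalk_inv (mc : PySem.Dict String Int) (K : List String) :
    ∀ (n i : Nat), i ≤ K.length → n = K.length - i →
    pvWalk (((K.map (fun m => mc.getD m 0)).drop (i - 6)).take (i - (i - 6)))
           ((((K.map (fun m => mc.getD m 0)).drop (i - 6)).take (i - (i - 6))).sum)
           ((K.map (fun m => (m, mc.getD m 0))).drop i)
      = ((PySem.List.enumerate K 0).drop i).map (pvRowA mc K) := by
  intro n
  induction n with
  | zero =>
      intro i hi hn
      have hieq : i = K.length := by omega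
      subst hieq
      rw [show (K.map (fun m => (m, mc.getD m 0))).drop K.length = [] by
            rw [List.drop_eq_nil_iff]; simp,
          show (PySem.List.enumerate K 0).drop K.length = [] by
            rw [List.drop_eq_nil_iff]; simp [PySem.List.length_enumerate]]
      rfl
  | succ n ih =>
      intro i hi hn
      have hlt : i < K.length := by omega
      have hgrp : (K.map (fun m => (m, mc.getD m 0))).drop i
          = (K[i], mc.getD K[i] 0) :: (K.map (fun m => (m, mc.getD m 0))).drop (i + 1) := by
        rw [List.drop_eq_getElem_cons (by simpa using hlt)]
        simp
      have henum : (PySem.List.enumerate K 0).drop i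
          = ((i : Int), K[i]) :: (PySem.List.enumerate K 0).drop (i + 1) := by
        rw [List.drop_eq_getElem_cons (by simp [PySem.List.length_enumerate, hlt])]
        rw [PySem.List.getElem_enumerate]
        simp
      rw [hgrp, henum, List.map_cons]
      show (let month := K[i]; let observed := mc.getD K[i] 0; _) = _
      simp only [pvWalk]
      have hWlen : (((K.map (fun m => mc.getD m 0)).drop (i - 6)).take (i - (i - 6))).length
          = i - (i - 6) := by
        simp only [List.length_take, List.length_drop, List.length_map]
        omega
      have happ : ((K.map (fun m => mc.getD m 0)).drop (i - 6)).take (i - (i - 6)) ++ [mc.getD K[i] 0]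
          = ((K.map (fun m => mc.getD m 0)).drop (i - 6)).take ((i - (i - 6)) + 1) := by
        rw [List.take_add_one, List.getElem?_drop,
          show (i - 6) + (i - (i - 6)) = i by omega,
          List.getElem?_eq_getElem (by simpa using hlt)]
        simp
      by_cases h6 : 6 ≤ i
      · rw [if_pos (by rw [List.length_append, hWlen]; simp; omega)]
        congr 1
        · exact pvRow_eq mc K i hlt
        · rw [happ, show i - (i - 6) + 1 = 7 by omega]
          obtain ⟨w, wt, hw⟩ : ∃ w wt,
              ((K.map (fun m => mc.getD m 0)).drop (i - 6)).take 7 = w :: wt := by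
            have h7 : (((K.map (fun m => mc.getD m 0)).drop (i - 6)).take 7).length = 7 := by
              simp only [List.length_take, List.length_drop, List.length_map]; omega
            cases h : ((K.map (fun m => mc.getD m 0)).drop (i - 6)).take 7 with
            | nil => rw [h] at h7; simp at h7
            | cons a b => exact ⟨a, b, rfl⟩
          rw [hw, PySem.List.slice_from_one]
          simp only [List.tail_cons]
          have hsum : (((K.map (fun m => mc.getD m 0)).drop (i - 6)).take (i - (i - 6))).sum
              + mc.getD K[i] 0 - PySem.List.pyGetD (w :: wt) 0 0 = wt.sum := by
            have hs := congrArg List.sum (happ.trans (by rw [show i - (i - 6) + 1 = 7 by omega, hw]))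
            simp only [List.sum_append, List.sum_cons, List.sum_nil, add_zero] at hs
            rw [PySem.List.pyGetD_zero_cons]
            omega
          have hwt : wt = ((K.map (fun m => mc.getD m 0)).drop ((i + 1) - 6)).take
              ((i + 1) - ((i + 1) - 6)) := by
            have h2 : (((K.map (fun m => mc.getD m 0)).drop (i - 6)).take 7).tail
                = (((K.map (fun m => mc.getD m 0)).drop (i - 6)).tail).take 6 := by
              cases ((K.map (fun m => mc.getD m 0)).drop (i - 6)) <;> simp
            have h2' : wt = (((K.map (fun m => mc.getD m 0)).drop (i - 6)).tail).take 6 := by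
              rw [← h2, hw, List.tail_cons]
            rw [List.tail_drop] at h2'
            rw [h2']
            congr 1
            · omega
            · congr 1
              omega
          rw [hsum, hwt]
          exact ih (i + 1) (by omega) (by omega)
      · rw [if_neg (by rw [List.length_append, hWlen]; simp; omega)]
        congr 1
        · exact pvRow_eq mc K i hlt
        · have hW1 : ((K.map (fun m => mc.getD m 0)).drop (i - 6)).take ((i - (i - 6)) + 1)
              = ((K.map (fun m => mc.getD m 0)).drop ((i + 1) - 6)).take
                  ((i + 1) - ((i + 1) - 6)) := by
            congr 1
            · omega
            · congr 1
              omega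
          have hsum : (((K.map (fun m => mc.getD m 0)).drop (i - 6)).take (i - (i - 6))).sum
              + mc.getD K[i] 0
              = (((K.map (fun m => mc.getD m 0)).drop ((i + 1) - 6)).take
                  ((i + 1) - ((i + 1) - 6))).sum := by
            rw [← hW1, ← happ]
            simp
          rw [hsum, happ, hW1]
          exact ih (i + 1) (by omega) (by omega)

-- ===== VERDICT (by name: the statement is the Claim_ definition above) =====
theorem build_coverage_gaps_spec : Claim_equal_build_coverage_gaps := by
  intro stays _
  unfold Spec_build_coverage_gaps
  show build_coverage_gaps stays = build_coverage_gaps_alt stays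
  unfold build_coverage_gaps build_coverage_gaps_alt
  dsimp only
  rw [pvMC_eq_counter stays]
  cases hms : pvMonthsOf stays with
  | nil => rfl
  | cons m0 t0 =>
      have hempty : (PySem.Dict.counter (m0 :: t0) : PySem.Dict String Int).items.isEmpty
          = false := by
        rw [PySem.Dict.items_counter]
        simp [PySem.Set.ofList_cons]
      rw [hempty]
      simp only [Bool.false_eq_true, if_false]
      rw [pvFold_map (pvRowA (PySem.Dict.counter (m0 :: t0))
            (PySem.List.sorted (PySem.Dict.counter (m0 :: t0)).keys (fun m => m))) _ _
          (fun acc x => by simp only [pvRowA]; split <;> rfl)]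
      -- name the common sorted month spine
      have hkeys : (PySem.Dict.counter (m0 :: t0) : PySem.Dict String Int).keys
          = PySem.Set.ofList (m0 :: t0) := PySem.Dict.keys_counter _
      have hKpair : ((PySem.List.sorted (PySem.Dict.counter (m0 :: t0)).keys
          (fun m => m)) : List String).Pairwise (· < ·) := by
        rw [hkeys]
        exact PySem.List.sorted_ofList_pairwise_lt (m0 :: t0)
      have hKnodup : ((PySem.List.sorted (PySem.Dict.counter (m0 :: t0)).keys
          (fun m => m)) : List String).Nodup := hKpair.imp (fun h => ne_of_lt h)
      have hKmem : ∀ x, x ∈ ((PySem.List.sorted (PySem.Dict.counter (m0 :: t0)).keys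
          (fun m => m)) : List String) ↔ x ∈ (m0 :: t0) := by
        intro x
        simp [PySem.List.mem_sorted, hkeys, PySem.Set.mem_ofList]
      -- B's sorted stamp list is the run-length decomposition along that spine
      have hflat : PySem.List.sorted (m0 :: t0) (fun m => m)
          = (PySem.List.sorted (PySem.Dict.counter (m0 :: t0)).keys (fun m => m)).flatMap
              (fun m => List.replicate ((m0 :: t0).count m) m) := by
        apply PySem.List.sorted_id_eq_of_perm_of_pairwise (m0 :: t0)
        · refine List.perm_iff_count.mpr (fun x => ?_)
          rw [pvCount_flatMap_replicate _ _ hKnodup]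
          by_cases hx : x ∈ ((PySem.List.sorted (PySem.Dict.counter (m0 :: t0)).keys
              (fun m => m)) : List String)
          · rw [if_pos hx]
          · rw [if_neg hx, eq_comm, List.count_eq_zero]
            exact fun hmem => hx ((hKmem x).mpr hmem)
        · exact pvPairwise_le_flatMap_replicate _ _ hKpair
      -- grouping that decomposition yields the (month, count) pairs
      have hgroups : (PySem.List.sorted (m0 :: t0) (fun m => m)).foldl pvGroupStep []
          = (PySem.List.sorted (PySem.Dict.counter (m0 :: t0)).keys (fun m => m)).map
              (fun m => (m, (PySem.Dict.counter (m0 :: t0) : PySem.Dict String Int).getD m 0)) := by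
        rw [hflat, pvGroup_flat _ _
            (fun m hm => List.count_pos_iff.mpr ((hKmem m).mp hm))
            ((hKpair.imp (fun h => ne_of_lt h)).isChain)]
        exact List.map_congr_left (fun m _ => by rw [PySem.Dict.getD_counter])
      rw [hgroups]
      exact (pvWalk_inv (PySem.Dict.counter (m0 :: t0))
          (PySem.List.sorted (PySem.Dict.counter (m0 :: t0)).keys (fun m => m))
          (PySem.List.sorted (PySem.Dict.counter (m0 :: t0)).keys (fun m => m)).length 0
          (by omega) (by omega)).symm
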